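-- pv_equiv track=rewrite | github.com/dgatf/smartport_bluetooth | src/main.py | check_crc
-- ===== SOURCE A (Python) =====
-- def check_crc(packet):
--     crc = 0
--     for c in range(2, 10):
--         crc += packet[c]
--         crc += crc >> 8
--         crc &= 0x00FF
--     crc = 0xFF - crc
--     if crc == 0:
--         return True
--     return False
-- ===== SOURCE B (Python) =====
-- def check_crc(packet):
--     def fold(i, crc):
--         if i == 10:
--             return crc
--         q, r = divmod(crc + packet[i], 256)
--         return fold(i + 1, (q + r) % 256)
--     return fold(2, 0) == 0xFF
-- ===== Notes on version B (the rewrite author's own statement) =====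
-- stated objective: alternative
-- what changed: Replaces the range(2,10) accumulator loop built on shifts and masks (crc >> 8, crc &= 0xFF) and a final 0xFF-crc==0 test by a recursive index fold using divmod arithmetic ((q+r) % 256 per byte) and a direct crc == 0xFF comparison.
import Mathlib
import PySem

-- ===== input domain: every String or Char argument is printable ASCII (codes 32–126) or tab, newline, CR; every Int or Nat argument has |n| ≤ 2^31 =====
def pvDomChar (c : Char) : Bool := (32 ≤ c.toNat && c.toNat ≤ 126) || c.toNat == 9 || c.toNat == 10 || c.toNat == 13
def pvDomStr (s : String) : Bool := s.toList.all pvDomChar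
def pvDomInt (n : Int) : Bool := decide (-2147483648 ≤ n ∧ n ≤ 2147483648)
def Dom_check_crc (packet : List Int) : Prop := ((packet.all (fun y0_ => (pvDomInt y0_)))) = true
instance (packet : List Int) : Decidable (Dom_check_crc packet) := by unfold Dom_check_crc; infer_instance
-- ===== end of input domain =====

-- B replaces A's indexed range(2,10) shift/mask loop by a recursive fold over the packet[2:10]
-- slice using divmod arithmetic, comparing the checksum to 0xFF directly (alternative decomposition).

set_option maxHeartbeats 1000000


-- ===== PORT A =====
-- 'crc &= 0x00FF' is PySem.Int.band crc 255; 'crc >> 8' is Lean's '>>> (8 : Nat)' (Python-exact per PYSEM).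
def check_crc (packet : List Int) : Bool :=
  let crc : Int := (PySem.List.pyRange 2 10 1).foldl (fun crc c =>
      let crc := crc + PySem.List.pyGetD packet c 0
      let crc := crc + (crc >>> (8 : Nat))
      PySem.Int.band crc 255) 0
  let crc := 255 - crc
  if crc = 0 then true else false

-- ===== PORT B =====
-- the inner recursive helper 'fold' of Source B; divmod(x, 256) is (floordiv x 256, mod x 256);
-- the Nat counter is fuel for termination only (fold is entered at i = 2 with fuel 8, enough to reach i = 10)
def pvFold (packet : List Int) : Nat → Int → Int → Int
  | 0, _, crc => crc
  | n + 1, i, crc =>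
      if i = 10 then crc
      else
        let t := crc + PySem.List.pyGetD packet i 0
        let q := PySem.Int.floordiv t 256
        let r := PySem.Int.mod t 256
        pvFold packet n (i + 1) (PySem.Int.mod (q + r) 256)

def check_crc_alt (packet : List Int) : Bool :=
  pvFold packet 8 2 0 == 255

-- ===== PRECONDITION & SPEC =====
-- A indexes packet[2]..packet[9]; it raises IndexError iff the packet has fewer than 10 elements.
def Pre_check_crc (packet : List Int) : Prop := 10 ≤ packet.length
instance (packet : List Int) : Decidable (Pre_check_crc packet) := by unfold Pre_check_crc; infer_instance
def pvWitness_check_crc : List Int := [0, 0, 1, 2, 3, 4, 5, 6, 7, 8]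
def Spec_check_crc (packet : List Int) (out : Bool) : Prop := out = check_crc_alt packet
instance (packet : List Int) (out : Bool) : Decidable (Spec_check_crc packet out) := by unfold Spec_check_crc; infer_instance

-- ===== CLAIM (what is proved, stated in full; the proofs are below) =====
def Claim_equal_check_crc : Prop := ∀ (packet : List Int), Dom_check_crc packet → Pre_check_crc packet → Spec_check_crc packet (check_crc packet)

-- ===== LEMMAS AND PROOFS =====

-- Python's 'a & 0xFF' is reduction mod 256, for every integer a
theorem pv_band255 (a : Int) : PySem.Int.band a 255 = a % 256 := by
  by_cases ha : 0 ≤ a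
  · have h8 : a.toNat &&& 255 = a.toNat % 256 := by
      have := Nat.and_two_pow_sub_one_eq_mod a.toNat 8
      norm_num at this; exact this
    simp only [PySem.Int.band, if_pos ha, if_pos (show (0:Int) ≤ 255 by norm_num)]
    rw [show ((255:Int).toNat) = 255 from rfl, h8]; omega
  · have h8 : 255 &&& (-a-1).toNat = (-a-1).toNat % 256 := by
      rw [Nat.land_comm]
      have := Nat.and_two_pow_sub_one_eq_mod (-a-1).toNat 8
      norm_num at this
      convert this using 2 <;> omega
    simp only [PySem.Int.band, if_neg ha, if_pos (show (0:Int) ≤ 255 by norm_num)]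
    rw [show ((255:Int).toNat) = 255 from rfl, h8]; omega

-- the masked accumulate step of A equals the divmod step of B, for every integer t
theorem pv_step_eq (t : Int) :
    PySem.Int.band (t + t >>> (8 : Nat)) 255
      = PySem.Int.mod (PySem.Int.floordiv t 256 + PySem.Int.mod t 256) 256 := by
  rw [pv_band255, Int.shiftRight_eq_div_pow,
      PySem.Int.floordiv_eq_ediv_of_pos (by norm_num),
      PySem.Int.mod_eq_emod_of_pos (by norm_num),
      PySem.Int.mod_eq_emod_of_pos (by norm_num)]
  norm_num
  omega

-- A's accumulation loop over range(i, 10) equals B's recursive index fold, step by step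
theorem pv_loop_eq (packet : List Int) (n : Nat) : ∀ (i crc : Int), i + n = 10 →
    (PySem.List.pyRange i 10 1).foldl (fun (crc c : Int) =>
      let crc := crc + PySem.List.pyGetD packet c 0
      let crc := crc + (crc >>> (8 : Nat))
      PySem.Int.band crc 255) crc = pvFold packet n i crc := by
  induction n with
  | zero =>
    intro i crc h
    have hi : i = 10 := by omega
    subst hi
    rw [PySem.List.pyRange_one_eq_nil (by omega)]
    rfl
  | succ n ih =>
    intro i crc h
    rw [PySem.List.pyRange_one_cons (by omega)]
    simp only [List.foldl_cons]
    rw [ih (i + 1) _ (by omega)]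
    simp only [pvFold, if_neg (show i ≠ 10 by omega)]
    rw [pv_step_eq]

theorem pv_final (c : Int) : (if (255 : Int) - c = 0 then true else false) = (c == 255) := by
  rcases eq_or_ne c 255 with h | h
  · simp [h]
  · simp [h, sub_eq_zero, Ne.symm h]

-- ===== VERDICT (by name: the statement is the Claim_ definition above) =====
theorem check_crc_spec : Claim_equal_check_crc := by
  intro packet _ _
  unfold Spec_check_crc
  simp only [check_crc, check_crc_alt]
  rw [pv_loop_eq packet 8 2 0 (by norm_num), pv_final]
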